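-- pv_equiv track=rewrite | github.com/jmacasad/smartresume.io | backend/app_legacy.py | format_technical_skills_inline
-- ===== SOURCE A (Python) =====
-- def format_technical_skills_inline(md_text):
--     lines = md_text.splitlines()
--     new_lines = []
--     in_tech_skills = False
--     skill_items = []
--
--     for line in lines:
--         if line.strip().lower().startswith("technical skills"):
--             new_lines.append(line)  # Preserve the header
--             in_tech_skills = True
--             continue
--         if in_tech_skills:
--             if line.strip().startswith("- "):
--                 skill_items.append(line[2:].strip())
--             elif not line.strip():
--                 continue
--             else:
--                 if skill_items:
--                     new_lines.append(" | ".join(skill_items))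
--                     skill_items = []
--                 in_tech_skills = False
--                 new_lines.append(line)
--         else:
--             new_lines.append(line)
--
--     if in_tech_skills and skill_items:
--         new_lines.append(" | ".join(skill_items))
--     return "\n".join(new_lines)
-- ===== SOURCE B (Python) =====
-- def format_technical_skills_inline(md_text):
--     # Segment-based: locate each "technical skills" header, slice out the whole
--     # contiguous bullet block that follows it, and collapse that slice with
--     # filters/comprehensions instead of a per-line state machine.
--     lines = md_text.splitlines()
--
--     def is_header(l):
--         return l.strip().lower().startswith("technical skills")
--
--     def in_block(l):
--         s = l.strip()
--         return s.lower().startswith("technical skills") or s.startswith("- ") or not s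
--
--     out = []
--     rest = lines
--     while True:
--         idx = next((k for k, l in enumerate(rest) if is_header(l)), None)
--         if idx is None:
--             out.extend(rest)
--             break
--         out.extend(rest[:idx + 1])
--         rest = rest[idx + 1:]
--         end = next((k for k, l in enumerate(rest) if not in_block(l)), len(rest))
--         block, rest = rest[:end], rest[end:]
--         out.extend(l for l in block if is_header(l))
--         items = [l[2:].strip() for l in block
--                  if not is_header(l) and l.strip().startswith("- ")]
--         if items:
--             out.append(" | ".join(items))
--     return "\n".join(out)
-- ===== Notes on version B (the rewrite author's own statement) =====
-- stated objective: alternative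
-- what changed: Replaces A's per-line flag state machine with a segment-based algorithm: repeatedly locate the next 'technical skills' header, slice out the whole contiguous bullet block after it, and collapse that slice with filters/comprehensions (headers kept, bullets joined with ' | ', blanks dropped), copying inter-segment lines verbatim.
import Mathlib
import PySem

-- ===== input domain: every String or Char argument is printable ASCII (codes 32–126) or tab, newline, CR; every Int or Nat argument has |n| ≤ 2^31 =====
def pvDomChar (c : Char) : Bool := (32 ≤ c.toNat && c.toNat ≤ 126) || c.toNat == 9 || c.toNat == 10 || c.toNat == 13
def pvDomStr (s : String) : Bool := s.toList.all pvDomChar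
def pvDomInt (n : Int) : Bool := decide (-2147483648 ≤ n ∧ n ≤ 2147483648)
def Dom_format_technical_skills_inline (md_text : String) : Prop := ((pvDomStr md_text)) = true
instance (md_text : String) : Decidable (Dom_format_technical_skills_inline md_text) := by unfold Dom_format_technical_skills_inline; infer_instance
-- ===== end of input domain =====

-- B replaces A's per-line flag state machine by a segment-based pass: find each
-- header, slice out the whole bullet block after it, collapse the slice with
-- filters (objective: alternative; same behaviour).

-- Shared small tests (the same inline expressions both Pythons write)
def ftsHeader (line : String) : Bool :=
  PySem.Str.startswith (PySem.Str.lower (PySem.Str.strip line)) "technical skills"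
def ftsBullet (line : String) : Bool :=
  PySem.Str.startswith (PySem.Str.strip line) "- "
def ftsBlank (line : String) : Bool :=
  PySem.Str.strip line == ""
def ftsItem (line : String) : String :=
  PySem.Str.strip (PySem.Str.slice line (some 2) none)

-- ===== PORT A =====
-- A's loop body: state = (new_lines, in_tech_skills, skill_items)
def ftsStepA (st : List String × Bool × List String) (line : String) :
    List String × Bool × List String :=
  let (new_lines, in_tech, items) := st
  if ftsHeader line then
    (new_lines ++ [line], true, items)
  else if in_tech then
    if ftsBullet line then
      (new_lines, in_tech, items ++ [ftsItem line])
    else if ftsBlank line then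
      (new_lines, in_tech, items)
    else
      ((if items ≠ [] then new_lines ++ [PySem.Str.join " | " items] else new_lines) ++ [line],
        false, [])
  else
    (new_lines ++ [line], in_tech, items)

def format_technical_skills_inline (md_text : String) : String :=
  let lines := PySem.Str.splitlines md_text
  let st := lines.foldl ftsStepA ([], false, [])
  let new_lines :=
    if st.2.1 && st.2.2 ≠ [] then st.1 ++ [PySem.Str.join " | " st.2.2] else st.1
  PySem.Str.join "\n" new_lines

-- ===== PORT B =====
-- Source B's in_block(l): header, bullet or blank (all three test the stripped line)
def ftsInBlock (line : String) : Bool := ftsHeader line || ftsBullet line || ftsBlank line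
-- Source B's 'next((k for k, l in enumerate(rest) if is_header(l)), None)': linear scan
def ftsFindHdr : List String → Option Nat
  | [] => none
  | l :: rest => if ftsHeader l then some 0 else (ftsFindHdr rest).map (· + 1)
-- Source B's 'next((k for k, l in enumerate(rest) if not in_block(l)), len(rest))'
def ftsFindEnd : List String → Nat
  | [] => 0
  | l :: rest => if !ftsInBlock l then 0 else ftsFindEnd rest + 1

-- Needed by ftsProc's decreasing_by (cited there by name)
theorem ftsFindHdr_ne_nil {lines : List String} {idx : Nat}
    (h : ftsFindHdr lines = some idx) : lines ≠ [] := by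
  cases lines with
  | nil => simp [ftsFindHdr] at h
  | cons a l => exact List.cons_ne_nil a l

-- Source B's while-loop with accumulator 'out'; slices rest[:k]/rest[k:] with
-- nonnegative in-range bounds are List.take/List.drop (exact there).
def ftsProc (out : List String) (rest : List String) : List String :=
  match _h : ftsFindHdr rest with
  | none => out ++ rest
  | some idx =>
    let out1 := out ++ rest.take (idx + 1)
    let rest2 := rest.drop (idx + 1)
    let e := ftsFindEnd rest2
    let block := rest2.take e
    let out2 := out1 ++ block.filter ftsHeader
    let items := (block.filter (fun l => !ftsHeader l && ftsBullet l)).map ftsItem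
    let out3 := if items ≠ [] then out2 ++ [PySem.Str.join " | " items] else out2
    ftsProc out3 (rest2.drop e)
termination_by rest.length
decreasing_by
  have hne : rest ≠ [] := ftsFindHdr_ne_nil _h
  have : 0 < rest.length := List.length_pos_iff.mpr hne
  simp only [List.length_drop]
  omega

def format_technical_skills_inline_alt (md_text : String) : String :=
  PySem.Str.join "\n" (ftsProc [] (PySem.Str.splitlines md_text))

-- ===== PRECONDITION & SPEC =====
def Spec_format_technical_skills_inline (md_text : String) (out : String) : Prop := out = format_technical_skills_inline_alt md_text
instance (md_text : String) (out : String) : Decidable (Spec_format_technical_skills_inline md_text out) := by unfold Spec_format_technical_skills_inline; infer_instance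

-- ===== CLAIM (what is proved, stated in full; the proofs are below) =====
def Claim_equal_format_technical_skills_inline : Prop := ∀ (md_text : String), Dom_format_technical_skills_inline md_text → Spec_format_technical_skills_inline md_text (format_technical_skills_inline md_text)

-- ===== LEMMAS AND PROOFS =====

-- A's finalization step
def ftsFin (st : List String × Bool × List String) : List String :=
  if st.2.1 && st.2.2 ≠ [] then st.1 ++ [PySem.Str.join " | " st.2.2] else st.1

-- Unfolding ftsProc at a non-header head: the line is copied into the accumulator
theorem ftsProc_cons_not_header (out : List String) (l : String) (rest : List String)
    (h : ftsHeader l = false) : ftsProc out (l :: rest) = ftsProc (out ++ [l]) rest := by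
  have hh : ftsFindHdr (l :: rest) = (ftsFindHdr rest).map (· + 1) := by
    simp [ftsFindHdr, h]
  cases hr : ftsFindHdr rest with
  | none =>
    rw [ftsProc, ftsProc, hh, hr]
    simp
  | some j =>
    rw [ftsProc, ftsProc, hh, hr]
    simp only [Option.map_some, List.take_succ_cons, List.drop_succ_cons, List.append_assoc,
      List.singleton_append]

-- Unfolding ftsProc at a header head: one whole block is consumed
theorem ftsProc_cons_header (out : List String) (l : String) (rest : List String)
    (h : ftsHeader l = true) :
    ftsProc out (l :: rest) =
      (let e := ftsFindEnd rest
       let block := rest.take e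
       let items := (block.filter (fun x => !ftsHeader x && ftsBullet x)).map ftsItem
       let out2 := out ++ [l] ++ block.filter ftsHeader
       ftsProc (if items ≠ [] then out2 ++ [PySem.Str.join " | " items] else out2)
         (rest.drop e)) := by
  have hh : ftsFindHdr (l :: rest) = some 0 := by simp [ftsFindHdr, h]
  rw [ftsProc, hh]
  simp

-- Core invariant: A's folded-and-finalized state equals B's segment loop.
theorem ftsLoop_eq (lines : List String) :
    (∀ out, ftsFin (lines.foldl ftsStepA (out, false, [])) = ftsProc out lines) ∧
    (∀ out items, ftsFin (lines.foldl ftsStepA (out, true, items)) =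
      (let e := ftsFindEnd lines
       let block := lines.take e
       let its := items ++ (block.filter (fun x => !ftsHeader x && ftsBullet x)).map ftsItem
       let out2 := out ++ block.filter ftsHeader
       ftsProc (if its ≠ [] then out2 ++ [PySem.Str.join " | " its] else out2)
         (lines.drop e))) := by
  induction lines with
  | nil =>
    constructor
    · intro out
      rw [ftsProc, show ftsFindHdr [] = none from rfl]
      simp [ftsFin]
    · intro out items
      simp only [ftsFindEnd, List.take_nil, List.drop_nil, List.filter_nil, List.map_nil,
        List.append_nil]
      rw [ftsProc, show ftsFindHdr [] = none from rfl]
      by_cases hi : items = [] <;> simp [ftsFin, hi]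
  | cons line rest ih =>
    obtain ⟨ih1, ih2⟩ := ih
    constructor
    · intro out
      by_cases h : ftsHeader line
      · rw [ftsProc_cons_header out line rest h]
        simpa [List.foldl_cons, ftsStepA, h] using ih2 (out ++ [line]) []
      · rw [ftsProc_cons_not_header out line rest (by simpa using h)]
        simpa [List.foldl_cons, ftsStepA, h] using ih1 (out ++ [line])
    · intro out items
      by_cases h : ftsHeader line
      · -- header inside a block: emitted now, join deferred
        have := ih2 (out ++ [line]) items
        simp only [List.foldl_cons, ftsStepA, h, if_true]
        rw [this]
        simp [ftsFindEnd, ftsInBlock, h, List.take_succ_cons, List.drop_succ_cons,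
          ftsBullet, List.append_assoc]
      · by_cases hb : ftsBullet line
        · -- bullet: item collected
          have := ih2 out (items ++ [ftsItem line])
          simp only [List.foldl_cons, ftsStepA, h, hb, if_true, if_false, Bool.false_eq_true]
          rw [this]
          simp [ftsFindEnd, ftsInBlock, h, hb, List.take_succ_cons, List.drop_succ_cons, List.append_assoc]
        · by_cases hs : ftsBlank line
          · -- blank: skipped
            have := ih2 out items
            simp only [List.foldl_cons, ftsStepA, h, hb, hs, if_true, if_false,
              Bool.false_eq_true]
            rw [this]
            simp [ftsFindEnd, ftsInBlock, h, hb, hs, List.take_succ_cons, List.drop_succ_cons]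
          · -- terminator: flush the join, emit the line, leave the block
            have hfe : ftsFindEnd (line :: rest) = 0 := by
              simp [ftsFindEnd, ftsInBlock, h, hb, hs]
            have hstep : ∀ o : List String,
                ftsFin (List.foldl ftsStepA (o ++ [line], false, []) rest) =
                  ftsProc o (line :: rest) := fun o =>
              (ih1 (o ++ [line])).trans
                (ftsProc_cons_not_header o line rest (by simpa using h)).symm
            simp [List.foldl_cons, ftsStepA, h, hb, hs, hfe]
            exact hstep _

-- ===== VERDICT (by name: the statement is the Claim_ definition above) =====
theorem format_technical_skills_inline_spec : Claim_equal_format_technical_skills_inline := by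
  intro md_text _
  unfold Spec_format_technical_skills_inline format_technical_skills_inline
    format_technical_skills_inline_alt
  exact congrArg (PySem.Str.join "\n") ((ftsLoop_eq (PySem.Str.splitlines md_text)).1 [])
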